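-- pv_equiv track=rewrite | github.com/breecummins/NetworkBuilder | databasecomputability.py | checkEdgeAdmissible
-- ===== SOURCE A (Python) =====
-- def checkEdgeAdmissible(outedges,regulation):
--     # THIS CODE CAN EASILY BECOME OBSOLETE!!!!
--     # The following is based on the files in /share/data/bcummins/work/share/DSGRN/logic/ as of 04/22/16,
--     # and on the choice that activations are ALWAYS summed and repressions are ALWAYS multiplied.
--     # In particular, the files 4_x_2_2.dat will never be used.
--     inedges = []
--     inreg = []
--     for node in range(len(outedges)):
--         ie = []
--         ir = []
--         for j,(o,r) in enumerate(zip(outedges,regulation)):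
--             try:
--                 ind = o.index(node)
--             except:
--                 ind = None
--             if ind is not None:
--                 ie.append(j)
--                 ir.append(r[ind])
--         inedges.append(ie)
--         inreg.append(ir)
--     for (ie, oe, ir) in zip(inedges,outedges,inreg):
--         if len(ie) > 5:
--             return False
--         elif len(oe) > 7:
--             return False
--         elif len(ie) == 3 and len(oe)>5:
--             return False
--         elif len(ie) == 4:
--             if ir.count('a') != 4 and ir.count('r') != 4:
--                 return False
--             elif len(oe) == 3:
--                 return False
--             elif len(oe) == 4 and ir.count('r') != 4:
--                 return False
--             elif len(oe) >= 5:
--                 return False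
--         elif len(ie) == 5:
--             if len(oe) > 1:
--                 return False
--             elif ir.count('r') != 5 and ir.count('a') != 5:
--                 return False
--     return True
-- ===== SOURCE B (Python) =====
-- def checkEdgeAdmissible(outedges, regulation):
--     # One pass over the edge lists builds the in-degree and per-target 'a'/'r'
--     # regulation counts (first occurrence per source list, like list.index),
--     # then each node is checked against the degree/regulation table.
--     n = len(outedges)
--     indeg = {}
--     acount = {}
--     rcount = {}
--     for o, r in zip(outedges, regulation):
--         seen = set()
--         for t, reg in zip(o, r):
--             if 0 <= t < n and t not in seen:
--                 seen.add(t)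
--                 indeg[t] = indeg.get(t, 0) + 1
--                 if reg == 'a':
--                     acount[t] = acount.get(t, 0) + 1
--                 elif reg == 'r':
--                     rcount[t] = rcount.get(t, 0) + 1
--     for t in range(n):
--         d = indeg.get(t, 0)
--         k = len(outedges[t])
--         a = acount.get(t, 0)
--         rr = rcount.get(t, 0)
--         if d > 5 or k > 7 or (d == 3 and k > 5):
--             return False
--         if d == 4 and not ((a == 4 or rr == 4) and (k <= 2 or (k == 4 and rr == 4))):
--             return False
--         if d == 5 and not (k <= 1 and (rr == 5 or a == 5)):
--             return False
--     return True
-- ===== Notes on version B (the rewrite author's own statement) =====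
-- stated objective: faster
-- what changed: Instead of scanning every out-edge list once per node (N * total_edges index searches), B builds the in-degree and per-target 'a'/'r' regulation counters in one pass over zip(outedges, regulation) using a per-row seen-set for first occurrences, then checks each node against those tables in O(1).
import Mathlib
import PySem

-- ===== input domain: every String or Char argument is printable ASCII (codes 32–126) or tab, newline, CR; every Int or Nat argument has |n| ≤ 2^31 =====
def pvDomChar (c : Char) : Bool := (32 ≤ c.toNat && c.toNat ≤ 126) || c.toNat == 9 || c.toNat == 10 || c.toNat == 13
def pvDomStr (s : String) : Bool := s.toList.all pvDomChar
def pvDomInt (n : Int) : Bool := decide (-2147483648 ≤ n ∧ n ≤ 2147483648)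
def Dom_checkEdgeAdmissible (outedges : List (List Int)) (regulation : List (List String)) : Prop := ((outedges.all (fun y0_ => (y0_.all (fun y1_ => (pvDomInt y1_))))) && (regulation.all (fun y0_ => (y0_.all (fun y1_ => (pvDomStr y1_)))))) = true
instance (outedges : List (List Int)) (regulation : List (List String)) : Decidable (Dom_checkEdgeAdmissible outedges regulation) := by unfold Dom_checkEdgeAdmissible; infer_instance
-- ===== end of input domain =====

-- B replaces A's per-node rescans of all out-edge lists by one accumulation pass building
-- in-degree and 'a'/'r' regulation counters per target node (objective: faster, asymptotic).

-- ===== PORT A =====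
-- inner loop 'for j,(o,r) in enumerate(zip(outedges,regulation)): ind = o.index(node) …'
-- (r[ind] is ported by pyGet?; its IndexError inputs are excluded by Pre_ below)
def pvA_row (outedges : List (List Int)) (regulation : List (List String)) (node : Int) :
    List Int × List String :=
  (PySem.List.enumerate (outedges.zip regulation) 0).foldl
    (fun acc jp =>
      match PySem.List.index? jp.2.1 node with
      | some ind =>
          (acc.1 ++ [jp.1], acc.2 ++ [((PySem.List.pyGet? jp.2.2 (ind : Int)).getD "")])
      | none => acc)
    ([], [])

-- the final 'for (ie, oe, ir) in zip(…): if …: return False …' loop, early returns as recursion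
def pvA_check : List ((List Int × List Int) × List String) → Bool
  | [] => true
  | ((ie, oe), ir) :: rest =>
    if ie.length > 5 then false
    else if oe.length > 7 then false
    else if ie.length = 3 ∧ oe.length > 5 then false
    else if ie.length = 4 then
      if PySem.List.count ir "a" ≠ 4 ∧ PySem.List.count ir "r" ≠ 4 then false
      else if oe.length = 3 then false
      else if oe.length = 4 ∧ PySem.List.count ir "r" ≠ 4 then false
      else if oe.length ≥ 5 then false
      else pvA_check rest
    else if ie.length = 5 then
      if oe.length > 1 then false
      else if PySem.List.count ir "r" ≠ 5 ∧ PySem.List.count ir "a" ≠ 5 then false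
      else pvA_check rest
    else pvA_check rest

def checkEdgeAdmissible (outedges : List (List Int)) (regulation : List (List String)) : Bool :=
  let rows := (List.range outedges.length).map
    (fun (node : Nat) => pvA_row outedges regulation (node : Int))
  let inedges := rows.map Prod.fst
  let inreg := rows.map Prod.snd
  pvA_check ((inedges.zip outedges).zip inreg)

-- ===== PORT B =====
-- one pass over zip(outedges, regulation): per row a seen-set picks the first occurrence of
-- each in-range target; three dicts accumulate in-degree and 'a'/'r' regulation counts
def pvB_step (n : Int)
    (st : PySem.Set Int × PySem.Dict Int Int × PySem.Dict Int Int × PySem.Dict Int Int)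
    (q : Int × String) :
    PySem.Set Int × PySem.Dict Int Int × PySem.Dict Int Int × PySem.Dict Int Int :=
  if 0 ≤ q.1 ∧ q.1 < n ∧ ¬ (PySem.Set.contains st.1 q.1 = true) then
    (PySem.Set.add st.1 q.1,
     st.2.1.insert q.1 (st.2.1.getD q.1 0 + 1),
     (if q.2 = "a" then st.2.2.1.insert q.1 (st.2.2.1.getD q.1 0 + 1) else st.2.2.1),
     (if ¬ q.2 = "a" ∧ q.2 = "r" then st.2.2.2.insert q.1 (st.2.2.2.getD q.1 0 + 1) else st.2.2.2))
  else st

def pvB_tables (outedges : List (List Int)) (regulation : List (List String)) :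
    PySem.Dict Int Int × PySem.Dict Int Int × PySem.Dict Int Int :=
  (outedges.zip regulation).foldl
    (fun ds p => ((p.1.zip p.2).foldl (pvB_step (outedges.length : Int)) (PySem.Set.empty, ds)).2)
    (PySem.Dict.empty, PySem.Dict.empty, PySem.Dict.empty)

-- 'for t in range(n): …' with early returns as recursion over the index list
def pvB_check (outedges : List (List Int))
    (indeg ac rc : PySem.Dict Int Int) : List Int → Bool
  | [] => true
  | t :: rest =>
    let d := indeg.getD t 0
    let k := (((PySem.List.pyGet? outedges t).getD []).length : Int)
    let a := ac.getD t 0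
    let rr := rc.getD t 0
    if d > 5 ∨ k > 7 ∨ (d = 3 ∧ k > 5) then false
    else if d = 4 ∧ ¬ ((a = 4 ∨ rr = 4) ∧ (k ≤ 2 ∨ (k = 4 ∧ rr = 4))) then false
    else if d = 5 ∧ ¬ (k ≤ 1 ∧ (rr = 5 ∨ a = 5)) then false
    else pvB_check outedges indeg ac rc rest

def checkEdgeAdmissible_alt (outedges : List (List Int)) (regulation : List (List String)) : Bool :=
  let t := pvB_tables outedges regulation
  pvB_check outedges t.1 t.2.1 t.2.2 (PySem.List.pyRange 0 (outedges.length : Int) 1)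

-- ===== PRECONDITION & SPEC =====
-- Pre_ excludes exactly the inputs on which A raises IndexError at r[ind]: some node's first
-- occurrence in outedges[j] lies at an index not smaller than len(regulation[j]).
def Pre_checkEdgeAdmissible (outedges : List (List Int)) (regulation : List (List String)) : Prop :=
  ∀ p ∈ outedges.zip regulation, ∀ node ∈ List.range outedges.length,
    (PySem.List.index? p.1 (node : Int)).all (fun i => decide (i < p.2.length)) = true
instance (outedges : List (List Int)) (regulation : List (List String)) : Decidable (Pre_checkEdgeAdmissible outedges regulation) := by unfold Pre_checkEdgeAdmissible; infer_instance
def pvWitness_checkEdgeAdmissible : List (List Int) × List (List String) :=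
  ([[1, 0], [0]], [["a", "r"], ["r"]])

def Spec_checkEdgeAdmissible (outedges : List (List Int)) (regulation : List (List String)) (out : Bool) : Prop := out = checkEdgeAdmissible_alt outedges regulation
instance (outedges : List (List Int)) (regulation : List (List String)) (out : Bool) : Decidable (Spec_checkEdgeAdmissible outedges regulation out) := by unfold Spec_checkEdgeAdmissible; infer_instance

-- ===== CLAIM (what is proved, stated in full; the proofs are below) =====
def Claim_equal_checkEdgeAdmissible : Prop := ∀ (outedges : List (List Int)) (regulation : List (List String)), Dom_checkEdgeAdmissible outedges regulation → Pre_checkEdgeAdmissible outedges regulation → Spec_checkEdgeAdmissible outedges regulation (checkEdgeAdmissible outedges regulation)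
-- ===== LEMMAS AND PROOFS =====

-- proof-side abbreviations: first matched regulation of target t in one (outedges, regulation) row
def pvFind (o : List Int) (r : List String) (t : Int) : Option String :=
  ((o.zip r).find? (fun q => q.1 == t)).map Prod.snd

theorem pvA_row_aux (t : Int) (l : List (Int × (List Int × List String)))
    (a1 : List Int) (a2 : List String) :
    l.foldl (fun acc jp =>
      match PySem.List.index? jp.2.1 t with
      | some ind => (acc.1 ++ [jp.1], acc.2 ++ [((PySem.List.pyGet? jp.2.2 (ind : Int)).getD "")])
      | none => acc) (a1, a2)
    = (a1 ++ (l.filter (fun jp => (PySem.List.index? jp.2.1 t).isSome)).map (·.1),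
       a2 ++ l.filterMap (fun jp => (PySem.List.index? jp.2.1 t).map
              (fun i => (PySem.List.pyGet? jp.2.2 (i : Int)).getD ""))) := by
  induction l generalizing a1 a2 with
  | nil => simp
  | cons jp rest ih =>
    cases h : PySem.List.index? jp.2.1 t with
    | none =>
      have hm : t ∉ jp.2.1 := (PySem.List.index?_eq_none_iff _ _).mp h
      have h' : List.idxOf? t jp.2.1 = none := by
        simpa [PySem.List.index?_eq_idxOf?] using h
      simp only [List.foldl_cons, h]
      rw [ih]
      simp [h']
    | some i =>
      have hm : t ∈ jp.2.1 := by
        obtain ⟨hk, hv, -⟩ := PySem.List.getElem_of_index?_eq_some h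
        exact hv ▸ List.getElem_mem hk
      have h' : List.idxOf? t jp.2.1 = some i := by
        simpa [PySem.List.index?_eq_idxOf?] using h
      simp only [List.foldl_cons, h]
      rw [ih]
      simp [h', List.append_assoc]

theorem pvA_row_snd (oe : List (List Int)) (rg : List (List String)) (t : Int) :
    (pvA_row oe rg t).2 = (oe.zip rg).filterMap (fun p => (PySem.List.index? p.1 t).map
      (fun i => (PySem.List.pyGet? p.2 (i : Int)).getD "")) := by
  unfold pvA_row
  rw [pvA_row_aux]
  simp only [List.nil_append]
  conv_rhs => rw [← PySem.List.map_snd_enumerate (oe.zip rg) 0]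
  rw [List.filterMap_map]
  rfl

theorem pvA_row_fst_len (oe : List (List Int)) (rg : List (List String)) (t : Int) :
    (pvA_row oe rg t).1.length
      = (oe.zip rg).countP (fun p => (PySem.List.index? p.1 t).isSome) := by
  unfold pvA_row
  rw [pvA_row_aux]
  simp only [List.nil_append, List.length_map]
  rw [← List.countP_eq_length_filter]
  conv_rhs => rw [← PySem.List.map_snd_enumerate (oe.zip rg) 0]
  rw [List.countP_map]
  rfl

theorem pv_count_filterMap {α : Type} (g : α → Option String) (l : List α) (v : String) :
    (l.filterMap g).count v = l.countP (fun x => g x == some v) := by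
  induction l with
  | nil => rfl
  | cons x rest ih =>
    cases h : g x with
    | none => simp [h, ih]
    | some w =>
      by_cases hw : w = v <;>
        simp [h, ih, hw]

-- Under Pre_ (first occurrence index within regulation row), A's index?-based lookup
-- is exactly the first match in zip(o, r).
theorem pv_find_zip (o : List Int) (r : List String) (t : Int)
    (h : (PySem.List.index? o t).all (fun i => decide (i < r.length)) = true) :
    pvFind o r t = (PySem.List.index? o t).map
      (fun i => (PySem.List.pyGet? r (i : Int)).getD "") := by
  induction o generalizing r with
  | nil => simp [pvFind, PySem.List.index?]
  | cons x o' ih =>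
    by_cases hx : x = t
    · subst hx
      cases r with
      | nil =>
        rw [PySem.List.index?_cons_self] at h
        simp at h
      | cons y r' =>
        rw [PySem.List.index?_cons_self]
        simp [pvFind]
    · rw [PySem.List.index?_cons_of_ne o' hx] at h ⊢
      cases r with
      | nil =>
        cases hi : PySem.List.index? o' t with
        | none => simp [pvFind, hx, hi]
        | some i => rw [hi] at h; simp at h
      | cons y r' =>
        cases hi : PySem.List.index? o' t with
        | none =>
          have hih := ih r' (by rw [hi]; rfl)
          rw [hi] at hih
          simpa [pvFind, hx] using hih
        | some i =>
          have hlt : i + 1 < (y :: r').length := by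
            rw [hi] at h; simpa using h
          have hih := ih r' (by
            rw [hi]
            simp only [Option.all_some, decide_eq_true_eq]
            simp only [List.length_cons] at hlt
            omega)
          rw [hi] at hih
          have hhead : pvFind (x :: o') (y :: r') t = pvFind o' r' t := by
            simp [pvFind, hx]
          rw [hhead, hih]
          have hg : PySem.List.pyGet? (y :: r') ((i + 1 : Nat) : Int)
              = PySem.List.pyGet? r' (i : Int) := by
            push_cast
            rw [PySem.List.pyGet?_cons_succ]
          simp [hg]

-- B-side: once t is in the seen set, the rest of the row changes nothing at key t
theorem pvB_inner_frozen (n t : Int) (l : List (Int × String))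
    (st : PySem.Set Int × PySem.Dict Int Int × PySem.Dict Int Int × PySem.Dict Int Int)
    (hs : t ∈ st.1) :
    (t ∈ (l.foldl (pvB_step n) st).1) ∧
    ((l.foldl (pvB_step n) st).2.1.getD t 0 = st.2.1.getD t 0) ∧
    ((l.foldl (pvB_step n) st).2.2.1.getD t 0 = st.2.2.1.getD t 0) ∧
    ((l.foldl (pvB_step n) st).2.2.2.getD t 0 = st.2.2.2.getD t 0) := by
  induction l generalizing st with
  | nil => exact ⟨hs, rfl, rfl, rfl⟩
  | cons q rest ih =>
    rw [List.foldl_cons]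
    by_cases hc : 0 ≤ q.1 ∧ q.1 < n ∧ ¬ (PySem.Set.contains st.1 q.1 = true)
    · have hqt : q.1 ≠ t := by
        intro he
        exact hc.2.2 (by simp [PySem.Set.contains, he ▸ hs])
      have hst : pvB_step n st q =
          (PySem.Set.add st.1 q.1,
           st.2.1.insert q.1 (st.2.1.getD q.1 0 + 1),
           (if q.2 = "a" then st.2.2.1.insert q.1 (st.2.2.1.getD q.1 0 + 1) else st.2.2.1),
           (if ¬ q.2 = "a" ∧ q.2 = "r" then st.2.2.2.insert q.1 (st.2.2.2.getD q.1 0 + 1) else st.2.2.2)) := by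
        rw [pvB_step, if_pos hc]
      have hmem : t ∈ (pvB_step n st q).1 := by
        rw [hst]; exact (PySem.Set.mem_add _ _ _).mpr (Or.inl hs)
      obtain ⟨m1, m2, m3, m4⟩ := ih (pvB_step n st q) hmem
      refine ⟨m1, ?_, ?_, ?_⟩
      · rw [m2, hst]; exact PySem.Dict.getD_insert_of_ne _ _ _ hqt.symm
      · rw [m3, hst]
        split_ifs <;> first | exact PySem.Dict.getD_insert_of_ne _ _ _ hqt.symm | rfl
      · rw [m4, hst]
        split_ifs <;> first | exact PySem.Dict.getD_insert_of_ne _ _ _ hqt.symm | rfl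
    · rw [show pvB_step n st q = st by rw [pvB_step, if_neg hc]]
      exact ih st hs

-- B-side: t not yet seen — the row contributes its first zip match for t
theorem pvB_inner_fresh (n t : Int) (l : List (Int × String))
    (st : PySem.Set Int × PySem.Dict Int Int × PySem.Dict Int Int × PySem.Dict Int Int)
    (hs : t ∉ st.1) (h0 : 0 ≤ t) (h1 : t < n) :
    ((l.foldl (pvB_step n) st).2.1.getD t 0
       = st.2.1.getD t 0 + (if (l.find? (fun q => q.1 == t)).isSome then 1 else 0)) ∧
    ((l.foldl (pvB_step n) st).2.2.1.getD t 0
       = st.2.2.1.getD t 0 + (if (l.find? (fun q => q.1 == t)).map Prod.snd = some "a" then 1 else 0)) ∧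
    ((l.foldl (pvB_step n) st).2.2.2.getD t 0
       = st.2.2.2.getD t 0 + (if (l.find? (fun q => q.1 == t)).map Prod.snd = some "r" then 1 else 0)) := by
  induction l generalizing st with
  | nil => simp
  | cons q rest ih =>
    rw [List.foldl_cons]
    by_cases hq : q.1 = t
    · have hf : List.find? (fun q => q.1 == t) (q :: rest) = some q :=
        List.find?_cons_of_pos (by simp [hq])
      rw [hf]
      have hcond : 0 ≤ q.1 ∧ q.1 < n ∧ ¬ (PySem.Set.contains st.1 q.1 = true) := by
        refine ⟨hq ▸ h0, hq ▸ h1, ?_⟩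
        simp [PySem.Set.contains, hq, hs]
      have hst : pvB_step n st q =
          (PySem.Set.add st.1 q.1,
           st.2.1.insert q.1 (st.2.1.getD q.1 0 + 1),
           (if q.2 = "a" then st.2.2.1.insert q.1 (st.2.2.1.getD q.1 0 + 1) else st.2.2.1),
           (if ¬ q.2 = "a" ∧ q.2 = "r" then st.2.2.2.insert q.1 (st.2.2.2.getD q.1 0 + 1) else st.2.2.2)) := by
        rw [pvB_step, if_pos hcond]
      have hmem : t ∈ (pvB_step n st q).1 := by
        rw [hst]; exact (PySem.Set.mem_add _ _ _).mpr (Or.inr hq.symm)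
      obtain ⟨-, m2, m3, m4⟩ := pvB_inner_frozen n t rest (pvB_step n st q) hmem
      refine ⟨?_, ?_, ?_⟩
      · rw [m2, hst]
        simp only
        rw [hq, PySem.Dict.getD_insert_self]
        simp
      · rw [m3, hst]
        simp only
        by_cases ha : q.2 = "a"
        · rw [if_pos ha, hq, PySem.Dict.getD_insert_self]
          simp [ha]
        · rw [if_neg ha]
          simp [ha]
      · rw [m4, hst]
        simp only
        by_cases hr : q.2 = "r"
        · by_cases ha : q.2 = "a"
          · exact absurd (ha ▸ hr) (by decide)
          · rw [if_pos ⟨ha, hr⟩, hq, PySem.Dict.getD_insert_self]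
            simp [hr]
        · have : ¬ (¬ q.2 = "a" ∧ q.2 = "r") := fun ⟨_, c⟩ => hr c
          rw [if_neg this]
          simp [hr]
    · have hf : List.find? (fun q => q.1 == t) (q :: rest) = List.find? (fun q => q.1 == t) rest :=
        List.find?_cons_of_neg (by simp [hq])
      rw [hf]
      by_cases hc : 0 ≤ q.1 ∧ q.1 < n ∧ ¬ (PySem.Set.contains st.1 q.1 = true)
      · have hst : pvB_step n st q =
            (PySem.Set.add st.1 q.1,
             st.2.1.insert q.1 (st.2.1.getD q.1 0 + 1),
             (if q.2 = "a" then st.2.2.1.insert q.1 (st.2.2.1.getD q.1 0 + 1) else st.2.2.1),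
             (if ¬ q.2 = "a" ∧ q.2 = "r" then st.2.2.2.insert q.1 (st.2.2.2.getD q.1 0 + 1) else st.2.2.2)) := by
          rw [pvB_step, if_pos hc]
        have hns : t ∉ (pvB_step n st q).1 := by
          rw [hst]
          intro hmem
          rcases (PySem.Set.mem_add _ _ _).mp hmem with h | h
          · exact hs h
          · exact hq h.symm
        obtain ⟨m2, m3, m4⟩ := ih (pvB_step n st q) hns
        have e2 : (pvB_step n st q).2.1.getD t 0 = st.2.1.getD t 0 := by
          rw [hst]; exact PySem.Dict.getD_insert_of_ne _ _ _ (fun he => hq he.symm)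
        have e3 : (pvB_step n st q).2.2.1.getD t 0 = st.2.2.1.getD t 0 := by
          rw [hst]
          split_ifs <;> first | exact PySem.Dict.getD_insert_of_ne _ _ _ (fun he => hq he.symm) | rfl
        have e4 : (pvB_step n st q).2.2.2.getD t 0 = st.2.2.2.getD t 0 := by
          rw [hst]
          split_ifs <;> first | exact PySem.Dict.getD_insert_of_ne _ _ _ (fun he => hq he.symm) | rfl
        exact ⟨by rw [m2, e2], by rw [m3, e3], by rw [m4, e4]⟩
      · rw [show pvB_step n st q = st by rw [pvB_step, if_neg hc]]
        exact ih st hs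

theorem pvB_fold_getD (n t : Int) (ps : List (List Int × List String))
    (ds : PySem.Dict Int Int × PySem.Dict Int Int × PySem.Dict Int Int)
    (h0 : 0 ≤ t) (h1 : t < n) :
    ((ps.foldl (fun ds p => ((p.1.zip p.2).foldl (pvB_step n) (PySem.Set.empty, ds)).2) ds).1.getD t 0
       = ds.1.getD t 0 + (ps.countP (fun p => (pvFind p.1 p.2 t).isSome) : Int)) ∧
    ((ps.foldl (fun ds p => ((p.1.zip p.2).foldl (pvB_step n) (PySem.Set.empty, ds)).2) ds).2.1.getD t 0
       = ds.2.1.getD t 0 + (ps.countP (fun p => pvFind p.1 p.2 t == some "a") : Int)) ∧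
    ((ps.foldl (fun ds p => ((p.1.zip p.2).foldl (pvB_step n) (PySem.Set.empty, ds)).2) ds).2.2.getD t 0
       = ds.2.2.getD t 0 + (ps.countP (fun p => pvFind p.1 p.2 t == some "r") : Int)) := by
  induction ps generalizing ds with
  | nil => simp
  | cons p rest ih =>
    rw [List.foldl_cons]
    have hs : t ∉ (PySem.Set.empty : PySem.Set Int) := by simp [PySem.Set.empty]
    obtain ⟨f1, f2, f3⟩ :=
      pvB_inner_fresh n t (p.1.zip p.2) (PySem.Set.empty, ds) hs h0 h1
    obtain ⟨r1, r2, r3⟩ := ih (((p.1.zip p.2).foldl (pvB_step n) (PySem.Set.empty, ds)).2)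
    refine ⟨?_, ?_, ?_⟩
    · rw [r1, f1]
      simp only [pvFind, List.countP_cons, Option.isSome_map]
      by_cases hh : ((p.1.zip p.2).find? (fun q => q.1 == t)).isSome <;> simp [hh] <;> push_cast <;> ring
    · rw [r2, f2]
      simp only [pvFind, List.countP_cons]
      by_cases hh : ((p.1.zip p.2).find? (fun q => q.1 == t)).map Prod.snd = some "a" <;>
        simp [hh] <;> push_cast <;> ring
    · rw [r3, f3]
      simp only [pvFind, List.countP_cons]
      by_cases hh : ((p.1.zip p.2).find? (fun q => q.1 == t)).map Prod.snd = some "r" <;>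
        simp [hh] <;> push_cast <;> ring

-- early-return loops as List.all
def pvNodeA (x : (List Int × List Int) × List String) : Bool :=
  if x.1.1.length > 5 then false
  else if x.1.2.length > 7 then false
  else if x.1.1.length = 3 ∧ x.1.2.length > 5 then false
  else if x.1.1.length = 4 then
    if PySem.List.count x.2 "a" ≠ 4 ∧ PySem.List.count x.2 "r" ≠ 4 then false
    else if x.1.2.length = 3 then false
    else if x.1.2.length = 4 ∧ PySem.List.count x.2 "r" ≠ 4 then false
    else if x.1.2.length ≥ 5 then false
    else true
  else if x.1.1.length = 5 then
    if x.1.2.length > 1 then false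
    else if PySem.List.count x.2 "r" ≠ 5 ∧ PySem.List.count x.2 "a" ≠ 5 then false
    else true
  else true

theorem pvA_check_eq_all (l : List ((List Int × List Int) × List String)) :
    pvA_check l = l.all pvNodeA := by
  induction l with
  | nil => rfl
  | cons x rest ih =>
    obtain ⟨⟨ie, oe⟩, ir⟩ := x
    simp only [pvA_check, pvNodeA, List.all_cons]
    split_ifs <;> simp [ih]

def pvNodeB (outedges : List (List Int)) (indeg ac rc : PySem.Dict Int Int) (t : Int) : Bool :=
  let d := indeg.getD t 0
  let k := (((PySem.List.pyGet? outedges t).getD []).length : Int)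
  let a := ac.getD t 0
  let rr := rc.getD t 0
  if d > 5 ∨ k > 7 ∨ (d = 3 ∧ k > 5) then false
  else if d = 4 ∧ ¬ ((a = 4 ∨ rr = 4) ∧ (k ≤ 2 ∨ (k = 4 ∧ rr = 4))) then false
  else if d = 5 ∧ ¬ (k ≤ 1 ∧ (rr = 5 ∨ a = 5)) then false
  else true

theorem pvB_check_eq_all (outedges : List (List Int)) (indeg ac rc : PySem.Dict Int Int)
    (l : List Int) :
    pvB_check outedges indeg ac rc l = l.all (pvNodeB outedges indeg ac rc) := by
  induction l with
  | nil => rfl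
  | cons t rest ih =>
    simp only [pvB_check, pvNodeB, List.all_cons]
    split_ifs <;> simp [ih]

theorem pv_all_congr {α : Type} (l : List α) (f g : α → Bool)
    (h : ∀ x ∈ l, f x = g x) : l.all f = l.all g := by
  induction l with
  | nil => rfl
  | cons x rest ih =>
    simp only [List.all_cons, h x (List.mem_cons_self), ih (fun y hy => h y (List.mem_cons_of_mem _ hy))]

-- the two branch chains agree as pure arithmetic on the four statistics
theorem pv_node_eq (x : (List Int × List Int) × List String)
    (outedges : List (List Int)) (indeg ac rc : PySem.Dict Int Int) (t : Int)
    (hd : indeg.getD t 0 = (x.1.1.length : Int))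
    (ha : ac.getD t 0 = (PySem.List.count x.2 "a" : Int))
    (hr : rc.getD t 0 = (PySem.List.count x.2 "r" : Int))
    (hk : ((PySem.List.pyGet? outedges t).getD []).length = x.1.2.length) :
    pvNodeA x = pvNodeB outedges indeg ac rc t := by
  unfold pvNodeA pvNodeB
  simp only [hd, ha, hr, hk]
  split_ifs <;> first | rfl | (exfalso; omega)

-- A's zipped node list written as a map over the node range
theorem pv_zl_eq (oe : List (List Int)) (rg : List (List String)) :
    (((((List.range oe.length).map (fun (node : Nat) => pvA_row oe rg (node : Int))).map Prod.fst).zip oe).zip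
      (((List.range oe.length).map (fun (node : Nat) => pvA_row oe rg (node : Int))).map Prod.snd))
    = (List.range oe.length).map
        (fun (i : Nat) => (((pvA_row oe rg (i : Int)).1, oe.getD i []), (pvA_row oe rg (i : Int)).2)) := by
  apply List.ext_getElem
  · simp
  · intro i h1 h2
    simp only [List.length_zip, List.length_map, List.length_range, min_self] at h1
    simp [List.getElem_zip, List.getD_eq_getElem?_getD, List.getElem?_eq_getElem, h1]


-- ===== VERDICT (by name: the statement is the Claim_ definition above) =====
theorem checkEdgeAdmissible_spec : Claim_equal_checkEdgeAdmissible := by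
  intro oe rg _ hpre
  show checkEdgeAdmissible oe rg = checkEdgeAdmissible_alt oe rg
  unfold checkEdgeAdmissible checkEdgeAdmissible_alt
  simp only []
  rw [pvA_check_eq_all, pv_zl_eq, List.all_map]
  rw [PySem.List.pyRange_zero_natCast, pvB_check_eq_all, List.all_map]
  apply pv_all_congr
  intro i hi
  have hin : i < oe.length := List.mem_range.mp hi
  simp only [Function.comp]
  -- the four statistics agree
  have hfold := pvB_fold_getD (oe.length : Int) (i : Int) (oe.zip rg)
    (PySem.Dict.empty, PySem.Dict.empty, PySem.Dict.empty)
    (by positivity) (by exact_mod_cast hin)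
  have hgd : ∀ p ∈ oe.zip rg, pvFind p.1 p.2 (i : Int)
      = (PySem.List.index? p.1 (i : Int)).map
          (fun k => (PySem.List.pyGet? p.2 (k : Int)).getD "") :=
    fun p hp => pv_find_zip p.1 p.2 (i : Int) (hpre p hp i hi)
  have hcp1 : List.countP (fun p => (pvFind p.1 p.2 (i : Int)).isSome) (oe.zip rg)
      = List.countP (fun p => (PySem.List.index? p.1 (i : Int)).isSome) (oe.zip rg) :=
    List.countP_congr (fun p hp => by
      rw [hgd p hp]
      cases h : PySem.List.index? p.1 (i : Int) <;> simp [h])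
  have hcpa : ∀ v : String,
      List.countP (fun p => pvFind p.1 p.2 (i : Int) == some v) (oe.zip rg)
      = List.countP (fun p => ((PySem.List.index? p.1 (i : Int)).map
          (fun k => (PySem.List.pyGet? p.2 (k : Int)).getD "")) == some v) (oe.zip rg) :=
    fun v => List.countP_congr (fun p hp => by rw [hgd p hp])
  have htb : (pvB_tables oe rg) = ((oe.zip rg).foldl
      (fun ds p => ((p.1.zip p.2).foldl (pvB_step (oe.length : Int)) (PySem.Set.empty, ds)).2)
      (PySem.Dict.empty, PySem.Dict.empty, PySem.Dict.empty)) := rfl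
  have hd : (pvB_tables oe rg).1.getD (i : Int) 0 = ((pvA_row oe rg (i : Int)).1.length : Int) := by
    rw [pvA_row_fst_len, htb, hfold.1, PySem.Dict.getD_empty, hcp1]
    ring
  have ha : (pvB_tables oe rg).2.1.getD (i : Int) 0
      = (PySem.List.count (pvA_row oe rg (i : Int)).2 "a" : Int) := by
    rw [PySem.List.count_eq, pvA_row_snd, pv_count_filterMap]
    rw [htb, hfold.2.1, PySem.Dict.getD_empty, hcpa "a"]
    ring
  have hr : (pvB_tables oe rg).2.2.getD (i : Int) 0
      = (PySem.List.count (pvA_row oe rg (i : Int)).2 "r" : Int) := by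
    rw [PySem.List.count_eq, pvA_row_snd, pv_count_filterMap]
    rw [htb, hfold.2.2, PySem.Dict.getD_empty, hcpa "r"]
    ring
  have hk : ((PySem.List.pyGet? oe (i : Int)).getD []).length = (oe.getD i []).length := by
    simp [List.getElem?_eq_getElem hin, List.getD_eq_getElem?_getD]
  exact pv_node_eq _ oe _ _ _ _ hd ha hr hk
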